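-- pv_equiv track=rewrite | github.com/SkylarSiggard/codeWars-Udemy-learningNotes | folders/recbooks.py | abcme
-- ===== SOURCE A (Python) =====
-- def abcme(thebookslist):
--     abdone = []
--     for i in thebookslist:
--         for j in i[0][::-1]:
--             if j == j.upper() and j != ' ':
--                 abdone.append(( j, i))
--                 break
--     return abdone
-- ===== SOURCE B (Python) =====
-- def abcme(thebookslist):
--     result = []
--     for book in thebookslist:
--         hits = [c for c in book[0] if c == c.upper() and c != ' ']
--         if hits:
--             result.append((hits[-1], book))
--     return result
-- ===== Notes on version B (the rewrite author's own statement) =====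
-- stated objective: alternative
-- what changed: Replaces A's reverse-scan-with-break by a staged pipeline: filter the title's qualifying characters into a list, then take that list's last element; equal output, same linear cost.
import Mathlib
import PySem

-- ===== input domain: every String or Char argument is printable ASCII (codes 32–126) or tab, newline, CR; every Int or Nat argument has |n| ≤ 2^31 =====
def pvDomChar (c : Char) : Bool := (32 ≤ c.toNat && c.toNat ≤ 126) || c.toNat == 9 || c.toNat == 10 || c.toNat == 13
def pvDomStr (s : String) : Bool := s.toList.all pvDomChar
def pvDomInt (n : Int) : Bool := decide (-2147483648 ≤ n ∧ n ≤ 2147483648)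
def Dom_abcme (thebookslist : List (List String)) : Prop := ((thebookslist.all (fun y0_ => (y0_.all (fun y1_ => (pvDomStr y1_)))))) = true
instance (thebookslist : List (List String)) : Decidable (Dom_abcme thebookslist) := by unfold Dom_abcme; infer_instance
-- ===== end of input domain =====

-- B changes the decomposition: filter the qualifying characters, then take the last — instead of A's reverse scan with break.

-- j == j.upper() and j != ' '  (Char.toUpper is exact for the ASCII domain)
def pvHit (c : Char) : Bool := (c == c.toUpper) && (c != ' ')

-- ===== PORT A =====
def abcme (thebookslist : List (List String)) : List (String × List String) :=
  thebookslist.foldl (fun abdone i =>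
    match PySem.List.pyGet? i 0 with
    | none => abdone  -- Python raises IndexError here; excluded by Pre_abcme
    | some t =>
      -- for j in i[0][::-1]: … break  = first match in the reversed character list
      match (t.toList.reverse).find? pvHit with
      | some j => abdone ++ [(String.ofList [j], i)]
      | none => abdone) []

-- ===== PORT B =====
-- per-book stage: filter the title's qualifying characters, take the last
def pvPick (i : List String) : List (String × List String) :=
  match PySem.List.pyGet? i 0 with
  | none => []  -- Python raises IndexError here; excluded by Pre_abcme
  | some t =>
    match (t.toList.filter pvHit).getLast? with
    | some c => [(String.ofList [c], i)]
    | none => []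

def abcme_alt (thebookslist : List (List String)) : List (String × List String) :=
  thebookslist.flatMap pvPick

-- ===== PRECONDITION & SPEC =====
-- Pre_ excludes lists containing an empty book, on which both Pythons raise IndexError at i[0].
def Pre_abcme (thebookslist : List (List String)) : Prop :=
  ∀ i ∈ thebookslist, i ≠ []
instance (thebookslist : List (List String)) : Decidable (Pre_abcme thebookslist) := by unfold Pre_abcme; infer_instance

def pvWitness_abcme : List (List String) := [["The Hobbit", "x"], ["abc def"]]

def Spec_abcme (thebookslist : List (List String)) (out : List (String × List String)) : Prop := out = abcme_alt thebookslist
instance (thebookslist : List (List String)) (out : List (String × List String)) : Decidable (Spec_abcme thebookslist out) := by unfold Spec_abcme; infer_instance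

-- ===== CLAIM =====
def Claim_equal_abcme : Prop := ∀ (thebookslist : List (List String)), Dom_abcme thebookslist → Pre_abcme thebookslist → Spec_abcme thebookslist (abcme thebookslist)

-- ===== LEMMAS AND PROOFS =====

-- first match of a list = head of its filtered list
theorem find?_eq_head?_filter' (p : Char → Bool) (cs : List Char) :
    cs.find? p = (cs.filter p).head? := by
  induction cs with
  | nil => rfl
  | cons c cs ih => cases h : p c <;> simp only [List.find?_cons, List.filter_cons, h, ih, List.head?_cons, if_pos, if_neg, Bool.false_eq_true, not_false_iff]

-- A's first match in the reversed title = B's last element of the filtered title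
theorem find?_reverse_eq_getLast?_filter (p : Char → Bool) (cs : List Char) :
    (cs.reverse).find? p = (cs.filter p).getLast? := by
  rw [find?_eq_head?_filter', List.filter_reverse, List.head?_reverse]

-- ===== VERDICT =====
theorem abcme_spec : Claim_equal_abcme := by
  intro l _ _
  unfold Spec_abcme abcme abcme_alt
  rw [show (fun (abdone : List (String × List String)) (i : List String) =>
      match PySem.List.pyGet? i 0 with
      | none => abdone
      | some t =>
        match (t.toList.reverse).find? pvHit with
        | some j => abdone ++ [(String.ofList [j], i)]
        | none => abdone) = (fun abdone i => abdone ++ pvPick i) from ?_,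
    PySem.List.foldl_append_eq_flatMap]
  · simp
  · funext acc i
    unfold pvPick
    cases PySem.List.pyGet? i 0 with
    | none => simp
    | some t =>
      simp only [find?_reverse_eq_getLast?_filter]
      cases (t.toList.filter pvHit).getLast? <;> simp
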